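-- pv_equiv track=rewrite | github.com/sidd1801/BT-group-BOOTCAMP | challenges/challenge-020-series-1-2-4-7/solution.py | generate_series
-- ===== SOURCE A (Python) =====
-- def generate_series(n):
--     result = []
--     current = 1
--     increment = 1
--
--     while current <= n:
--         result.append(current)
--         current += increment
--         increment += 1
--
--     return result
-- ===== SOURCE B (Python) =====
-- def generate_series(n):
--     result = []
--     i = 0
--     while True:
--         term = 1 + i * (i + 1) // 2
--         if term > n:
--             break
--         result.append(term)
--         i += 1
--     return result
-- ===== Notes on version B (the rewrite author's own statement) =====
-- stated objective: alternative
-- what changed: Each term is computed in closed form as one plus the i-th triangular number from an index counter, instead of maintaining running current/increment accumulator state.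
import Mathlib
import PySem

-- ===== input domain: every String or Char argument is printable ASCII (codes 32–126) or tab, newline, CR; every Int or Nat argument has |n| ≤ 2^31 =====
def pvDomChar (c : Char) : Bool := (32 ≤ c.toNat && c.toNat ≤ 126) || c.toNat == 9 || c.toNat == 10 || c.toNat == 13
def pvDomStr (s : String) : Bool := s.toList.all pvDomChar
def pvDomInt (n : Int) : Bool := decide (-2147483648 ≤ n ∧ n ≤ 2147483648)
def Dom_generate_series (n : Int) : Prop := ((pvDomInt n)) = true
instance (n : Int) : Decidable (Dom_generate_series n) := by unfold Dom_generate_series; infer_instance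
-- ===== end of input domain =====

-- B computes each term in closed form from its index (1 + i*(i+1)//2) instead of
-- maintaining running current/increment accumulator state; same cost, different decomposition.


-- ===== PORT A =====
-- A's while loop: state (current, increment); the positivity proof argument only
-- justifies termination (increment stays positive, so current strictly grows).
def genA_loop (n current increment : Int) (h : 0 < increment) : List Int :=
  if current ≤ n then
    current :: genA_loop n (current + increment) (increment + 1) (by omega)
  else []
termination_by (n + 1 - current).toNat
decreasing_by omega

def generate_series (n : Int) : List Int := genA_loop n 1 1 (by norm_num)

-- ===== PORT B =====
-- termination helper for B's loop: the term grows at least linearly in i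
theorem genB_term_ge (i : Int) (h : 0 ≤ i) : i + 1 ≤ 1 + PySem.Int.floordiv (i * (i + 1)) 2 := by
  rw [PySem.Int.floordiv_eq_ediv_of_pos (by norm_num)]
  have h2 : 2 * i ≤ i * (i + 1) := by
    rcases h.lt_or_eq with hpos | h0
    · nlinarith [mul_nonneg (by omega : (0:Int) ≤ i - 1) (by omega : (0:Int) ≤ i)]
    · simp [← h0]
  omega

-- B's loop: index counter i, each term computed in closed form as 1 + i*(i+1)//2.
def genB_loop (n i : Int) (h : 0 ≤ i) : List Int :=
  if 1 + PySem.Int.floordiv (i * (i + 1)) 2 ≤ n then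
    (1 + PySem.Int.floordiv (i * (i + 1)) 2) :: genB_loop n (i + 1) (by omega)
  else []
termination_by (n - i).toNat
decreasing_by have := genB_term_ge i h; omega

def generate_series_alt (n : Int) : List Int := genB_loop n 0 (by omega)

-- ===== PRECONDITION & SPEC =====
def Spec_generate_series (n : Int) (out : List Int) : Prop := out = generate_series_alt n
instance (n : Int) (out : List Int) : Decidable (Spec_generate_series n out) := by unfold Spec_generate_series; infer_instance

-- ===== CLAIM (what is proved, stated in full; the proofs are below) =====
def Claim_equal_generate_series : Prop := ∀ (n : Int), Dom_generate_series n → Spec_generate_series n (generate_series n)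

-- ===== LEMMAS AND PROOFS =====

-- the closed form steps like A's accumulator: T(i+1) = T(i) + (i+1)
theorem tri_step (i : Int) (h : 0 ≤ i) :
    PySem.Int.floordiv ((i + 1) * (i + 2)) 2 = PySem.Int.floordiv (i * (i + 1)) 2 + (i + 1) := by
  rw [PySem.Int.floordiv_eq_ediv_of_pos (by norm_num), PySem.Int.floordiv_eq_ediv_of_pos (by norm_num)]
  have hd : (2 : Int) ∣ i * (i + 1) := Int.even_mul_succ_self i |>.two_dvd
  have he : (i + 1) * (i + 2) = i * (i + 1) + 2 * (i + 1) := by ring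
  omega

-- A's loop started at state (1 + T(i), i + 1) equals B's loop started at index i
theorem loops_agree (n : Int) : ∀ k (i : Int) (h : 0 ≤ i), (n - i).toNat = k →
    genA_loop n (1 + PySem.Int.floordiv (i * (i + 1)) 2) (i + 1) (by omega) = genB_loop n i h := by
  intro k
  induction k using Nat.strong_induction_on with
  | _ k ih =>
    intro i h hk
    rw [genA_loop, genB_loop]
    split
    · next hle =>
      have hterm := genB_term_ge i h
      have harg : 1 + PySem.Int.floordiv (i * (i + 1)) 2 + (i + 1)
                = 1 + PySem.Int.floordiv ((i + 1) * (i + 1 + 1)) 2 := by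
        have hstep := tri_step i h
        have he : (i + 1) * (i + 1 + 1) = (i + 1) * (i + 2) := by ring
        rw [he]; omega
      congr 1
      rw [harg]
      exact ih (n - (i + 1)).toNat (by omega) (i + 1) (by omega) rfl
    · rfl

-- ===== VERDICT (by name: the statement is the Claim_ definition above) =====
theorem generate_series_spec : Claim_equal_generate_series := by
  intro n _
  unfold Spec_generate_series generate_series generate_series_alt
  have := loops_agree n (n - 0).toNat 0 (by omega) rfl
  simpa using this
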